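-- pv_equiv track=rewrite | github.com/graphistry/pygraphistry | graphistry/compute/gfql/row_expr_text.py | gfql_find_matching_case_end
-- ===== SOURCE A (Python) =====
-- def gfql_find_matching_case_end(expr: str) -> int:
--     txt = expr.strip()
--     n = len(txt)
--     if n < 8:
--         return -1
--
--     def _is_word_boundary(pos: int) -> bool:
--         return pos < 0 or pos >= n or not (txt[pos].isalnum() or txt[pos] == "_")
--
--     in_single = False
--     in_double = False
--     escaped = False
--     depth = 0
--     i = 0
--     while i < n:
--         ch = txt[i]
--         if in_single or in_double:
--             if escaped:
--                 escaped = False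
--                 i += 1
--                 continue
--             if ch == "\\":
--                 escaped = True
--                 i += 1
--                 continue
--             if in_single and ch == "'":
--                 in_single = False
--             elif in_double and ch == '"':
--                 in_double = False
--             i += 1
--             continue
--         if ch == "'":
--             in_single = True
--             i += 1
--             continue
--         if ch == '"':
--             in_double = True
--             i += 1
--             continue
--         if i + 4 <= n and txt[i : i + 4].upper() == "CASE":
--             if _is_word_boundary(i - 1) and _is_word_boundary(i + 4):
--                 depth += 1
--                 i += 4
--                 continue
--         if i + 3 <= n and txt[i : i + 3].upper() == "END":
--             if _is_word_boundary(i - 1) and _is_word_boundary(i + 3):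
--                 if depth <= 0:
--                     return -1
--                 depth -= 1
--                 if depth == 0:
--                     return i + 2
--                 i += 3
--                 continue
--         i += 1
--     return -1
-- ===== SOURCE B (Python) =====
-- def gfql_find_matching_case_end(expr: str) -> int:
--     txt = expr.strip()
--     n = len(txt)
--     if n < 8:
--         return -1
--
--     # Pass 1: string-literal mask. mask[i] is True iff char i is consumed while a
--     # quote is open (an unclosed quote masks everything to the end of the text).
--     mask = []
--     quote = ''
--     esc = False
--     for ch in txt:
--         mask.append(quote != '')
--         if quote:
--             if esc:
--                 esc = False
--             elif ch == '\\':
--                 esc = True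
--             elif ch == quote:
--                 quote = ''
--         elif ch == "'" or ch == '"':
--             quote = ch
--
--     def _word(c: str) -> bool:
--         return c.isalnum() or c == '_'
--
--     # Pass 2: flat scan over unmasked positions, tracking CASE/END nesting depth.
--     depth = 0
--     for i in range(n):
--         if mask[i]:
--             continue
--         if (txt[i:i + 4].upper() == "CASE"
--                 and (i == 0 or not _word(txt[i - 1]))
--                 and (i + 4 >= n or not _word(txt[i + 4]))):
--             depth += 1
--         elif (txt[i:i + 3].upper() == "END"
--                 and (i == 0 or not _word(txt[i - 1]))
--                 and (i + 3 >= n or not _word(txt[i + 3]))):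
--             if depth <= 0:
--                 return -1
--             depth -= 1
--             if depth == 0:
--                 return i + 2
--     return -1
-- ===== Notes on version B (the rewrite author's own statement) =====
-- stated objective: alternative
-- what changed: A's single interleaved scan (quote/escape state, token tests and variable-length index jumps in one while loop) is split into two passes: pass 1 builds an explicit string-literal mask with the same quote/escape state machine, pass 2 is a flat one-step-at-a-time scan that skips masked positions and tracks CASE/END nesting depth.
import Mathlib
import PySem

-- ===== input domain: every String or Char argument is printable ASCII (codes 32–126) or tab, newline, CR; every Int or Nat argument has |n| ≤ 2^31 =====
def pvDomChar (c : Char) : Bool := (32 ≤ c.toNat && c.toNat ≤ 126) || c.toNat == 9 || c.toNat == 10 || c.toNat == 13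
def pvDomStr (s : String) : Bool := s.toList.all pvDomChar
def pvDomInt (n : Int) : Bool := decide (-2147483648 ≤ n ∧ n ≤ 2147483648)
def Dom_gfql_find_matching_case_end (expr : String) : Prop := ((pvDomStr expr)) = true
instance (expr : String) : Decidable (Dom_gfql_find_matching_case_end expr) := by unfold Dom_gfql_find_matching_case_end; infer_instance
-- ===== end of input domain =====

-- B replaces A's single interleaved scan (quote state + token matching with jumps)
-- by two passes: a string-literal mask built first, then a flat depth scan; objective: alternative decomposition, not speed.

-- ===== PORT A =====
-- A's helper _is_word_boundary(pos): pos < 0 or pos >= n or not (txt[pos].isalnum() or txt[pos] == '_')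
def pvBoundA (t : List Char) (n : Nat) (pos : Int) : Bool :=
  decide (pos < 0) || decide ((n : Int) ≤ pos) ||
    !(PySem.Chars.isalnum (t.getD pos.toNat ' ') || t.getD pos.toNat ' ' == '_')

-- A's while loop, step for step; `i` increases by 1, 3 or 4, so recursion is on n - i.
def pvLoopA (t : List Char) (n : Nat) (inS inD esc : Bool) (depth : Int) (i : Nat) : Int :=
  if h : i < n then
    -- ch := txt[i] (safe: i < n), inlined as t.getD i ' '
    if inS || inD then
      if esc then pvLoopA t n inS inD false depth (i + 1)
      else if t.getD i ' ' = '\\' then pvLoopA t n inS inD true depth (i + 1)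
      else if inS ∧ t.getD i ' ' = '\'' then pvLoopA t n false inD esc depth (i + 1)
      else if inD ∧ t.getD i ' ' = '"' then pvLoopA t n inS false esc depth (i + 1)
      else pvLoopA t n inS inD esc depth (i + 1)
    else if t.getD i ' ' = '\'' then pvLoopA t n true inD esc depth (i + 1)
    else if t.getD i ' ' = '"' then pvLoopA t n inS true esc depth (i + 1)
    else if i + 4 ≤ n ∧ PySem.Chars.upper ((t.drop i).take 4) = ['C', 'A', 'S', 'E'] ∧
              pvBoundA t n ((i : Int) - 1) = true ∧ pvBoundA t n ((i : Int) + 4) = true then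
      pvLoopA t n inS inD esc (depth + 1) (i + 4)
    else if i + 3 ≤ n ∧ PySem.Chars.upper ((t.drop i).take 3) = ['E', 'N', 'D'] ∧
              pvBoundA t n ((i : Int) - 1) = true ∧ pvBoundA t n ((i : Int) + 3) = true then
      if depth ≤ 0 then -1
      else if depth - 1 = 0 then (i : Int) + 2
      else pvLoopA t n inS inD esc (depth - 1) (i + 3)
    else pvLoopA t n inS inD esc depth (i + 1)
  else -1
termination_by n - i
decreasing_by all_goals omega

def gfql_find_matching_case_end (expr : String) : Int :=
  let t := (PySem.Str.strip expr).toList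
  let n := t.length
  if n < 8 then -1 else pvLoopA t n false false false 0 0

-- ===== PORT B =====
-- B's pass 1: the string-literal mask (quote : Option Char plays B's quote variable, none = '').
def pvMask : List Char → Option Char → Bool → List Bool
  | [], _, _ => []
  | ch :: rest, some qc, esc =>
    true :: (if esc then pvMask rest (some qc) false
             else if ch = '\\' then pvMask rest (some qc) true
             else if ch = qc then pvMask rest none esc
             else pvMask rest (some qc) esc)
  | ch :: rest, none, esc =>
    false :: (if ch = '\'' ∨ ch = '"' then pvMask rest (some ch) esc
              else pvMask rest none esc)

def pvWordB (c : Char) : Bool := PySem.Chars.isalnum c || c == '_'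

-- B's pass 2: flat scan, one position at a time.
def pvLoopB (t : List Char) (mask : List Bool) (n : Nat) (depth : Int) (i : Nat) : Int :=
  if i < n then
    if mask.getD i false then pvLoopB t mask n depth (i + 1)
    else if PySem.Chars.upper ((t.drop i).take 4) = ['C', 'A', 'S', 'E'] ∧
              (i = 0 ∨ pvWordB (t.getD (i - 1) ' ') = false) ∧
              (i + 4 ≥ n ∨ pvWordB (t.getD (i + 4) ' ') = false) then
      pvLoopB t mask n (depth + 1) (i + 1)
    else if PySem.Chars.upper ((t.drop i).take 3) = ['E', 'N', 'D'] ∧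
              (i = 0 ∨ pvWordB (t.getD (i - 1) ' ') = false) ∧
              (i + 3 ≥ n ∨ pvWordB (t.getD (i + 3) ' ') = false) then
      if depth ≤ 0 then -1
      else if depth - 1 = 0 then (i : Int) + 2
      else pvLoopB t mask n (depth - 1) (i + 1)
    else pvLoopB t mask n depth (i + 1)
  else -1
termination_by n - i
decreasing_by all_goals omega

def gfql_find_matching_case_end_alt (expr : String) : Int :=
  let t := (PySem.Str.strip expr).toList
  let n := t.length
  if n < 8 then -1 else pvLoopB t (pvMask t none false) n 0 0

-- ===== PRECONDITION & SPEC =====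
def Spec_gfql_find_matching_case_end (expr : String) (out : Int) : Prop := out = gfql_find_matching_case_end_alt expr
instance (expr : String) (out : Int) : Decidable (Spec_gfql_find_matching_case_end expr out) := by unfold Spec_gfql_find_matching_case_end; infer_instance

-- ===== CLAIM (what is proved, stated in full; the proofs are below) =====
def Claim_equal_gfql_find_matching_case_end : Prop := ∀ (expr : String), Dom_gfql_find_matching_case_end expr → Spec_gfql_find_matching_case_end expr (gfql_find_matching_case_end expr)

-- ===== LEMMAS AND PROOFS =====

-- The one-character quote-state transition both programs implement.
def pvStepQ (st : Option Char × Bool) (ch : Char) : Option Char × Bool :=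
  match st with
  | (some qc, e) =>
    if e then (some qc, false)
    else if ch = '\\' then (some qc, true)
    else if ch = qc then (none, e)
    else (some qc, e)
  | (none, e) => if ch = '\'' ∨ ch = '"' then (some ch, e) else (none, e)

-- quote state before position i
def pvStQ (t : List Char) (i : Nat) : Option Char × Bool := (t.take i).foldl pvStepQ (none, false)

lemma pvMask_cons (ch : Char) (rest : List Char) (q : Option Char) (e : Bool) :
    pvMask (ch :: rest) q e = q.isSome :: pvMask rest (pvStepQ (q, e) ch).1 (pvStepQ (q, e) ch).2 := by
  cases q <;> simp only [pvMask, pvStepQ, Option.isSome] <;> split_ifs <;> simp_all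

lemma pvMask_get (t : List Char) : ∀ (i : Nat) (q : Option Char) (e : Bool), i < t.length →
    (pvMask t q e).getD i false = ((t.take i).foldl pvStepQ (q, e)).1.isSome := by
  induction t with
  | nil => intro i q e h; simp at h
  | cons ch rest ih =>
    intro i q e h
    rw [pvMask_cons]
    cases i with
    | zero => simp
    | succ j =>
      simp only [List.getD_cons_succ, List.take_succ_cons, List.foldl_cons]
      exact ih j _ _ (by simpa using h)

lemma pvStQ_succ (t : List Char) (i : Nat) (h : i < t.length) :
    pvStQ t (i + 1) = pvStepQ (pvStQ t i) (t.getD i ' ') := by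
  unfold pvStQ
  rw [List.take_add_one, List.foldl_append]
  simp [List.getD, h]

lemma pvDrop_cons (t : List Char) (i : Nat) (h : i < t.length) :
    t.drop i = t.getD i ' ' :: t.drop (i + 1) := by
  rw [List.drop_eq_getElem_cons h]
  simp [List.getD, List.getElem?_eq_getElem h]

lemma pvAlpha_of_upperChar {c u : Char} (hu : PySem.Chars.isalpha u = true)
    (h : PySem.Chars.upperChar c = u) : PySem.Chars.isalpha c = true := by
  unfold PySem.Chars.upperChar at h
  split_ifs at h with hl
  · simp [PySem.Chars.isalpha, hl]
  · rw [h]; exact hu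

-- relation between A's (inS, inD, esc) and the machine state
def pvRel (inS inD esc : Bool) (st : Option Char × Bool) : Prop :=
  st.2 = esc ∧ ((st.1 = none ∧ inS = false ∧ inD = false) ∨
                (st.1 = some '\'' ∧ inS = true ∧ inD = false) ∨
                (st.1 = some '"' ∧ inS = false ∧ inD = true))


lemma pvBoundA_left (t : List Char) (n : Nat) (hn : n = t.length) (i : Nat) (h : i < n) :
    (pvBoundA t n ((i : Int) - 1) = true) ↔ (i = 0 ∨ pvWordB (t.getD (i - 1) ' ') = false) := by
  unfold pvBoundA pvWordB
  by_cases h0 : i = 0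
  · subst h0; simp
  · have h1 : ¬((i : Int) - 1 < 0) := by omega
    have h2 : ¬((n : Int) ≤ (i : Int) - 1) := by omega
    have h3 : ((i : Int) - 1).toNat = i - 1 := by omega
    simp [h1, h2, h3, h0]

lemma pvBoundA_right (t : List Char) (n : Nat) (hn : n = t.length) (j : Nat) :
    (pvBoundA t n ((j : Int)) = true) ↔ (j ≥ n ∨ pvWordB (t.getD j ' ') = false) := by
  unfold pvBoundA pvWordB
  have h1 : ¬((j : Int) < 0) := by omega
  by_cases h2 : n ≤ j
  · have h2' : ((n : Int) ≤ (j : Int)) := by omega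
    simp [h1, h2, h2']
  · have h2' : ¬((n : Int) ≤ (j : Int)) := by omega
    simp [h1, h2, h2']

-- the word-boundary conditions of the two ports agree (CASE)
lemma pvCondCase_iff (t : List Char) (n : Nat) (hn : n = t.length) (i : Nat) (h : i < n) :
    (i + 4 ≤ n ∧ PySem.Chars.upper ((t.drop i).take 4) = ['C', 'A', 'S', 'E'] ∧
        pvBoundA t n ((i : Int) - 1) = true ∧ pvBoundA t n ((i : Int) + 4) = true) ↔
    (PySem.Chars.upper ((t.drop i).take 4) = ['C', 'A', 'S', 'E'] ∧
        (i = 0 ∨ pvWordB (t.getD (i - 1) ' ') = false) ∧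
        (i + 4 ≥ n ∨ pvWordB (t.getD (i + 4) ' ') = false)) := by
  have hb4 : ((i + 4 : Nat) : Int) = (i : Int) + 4 := by omega
  constructor
  · rintro ⟨h4, hs, hb1, hbr⟩
    refine ⟨hs, (pvBoundA_left t n hn i h).mp hb1, ?_⟩
    exact (pvBoundA_right t n hn (i + 4)).mp (by rw [hb4]; exact hbr)
  · rintro ⟨hs, hl, hr⟩
    have hlen : i + 4 ≤ n := by
      have := congrArg List.length hs
      simp [PySem.Chars.upper] at this
      omega
    refine ⟨hlen, hs, (pvBoundA_left t n hn i h).mpr hl, ?_⟩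
    rw [show ((i : Int) + 4) = ((i + 4 : Nat) : Int) from by omega]
    exact (pvBoundA_right t n hn (i + 4)).mpr hr

lemma pvCondEnd_iff (t : List Char) (n : Nat) (hn : n = t.length) (i : Nat) (h : i < n) :
    (i + 3 ≤ n ∧ PySem.Chars.upper ((t.drop i).take 3) = ['E', 'N', 'D'] ∧
        pvBoundA t n ((i : Int) - 1) = true ∧ pvBoundA t n ((i : Int) + 3) = true) ↔
    (PySem.Chars.upper ((t.drop i).take 3) = ['E', 'N', 'D'] ∧
        (i = 0 ∨ pvWordB (t.getD (i - 1) ' ') = false) ∧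
        (i + 3 ≥ n ∨ pvWordB (t.getD (i + 3) ' ') = false)) := by
  constructor
  · rintro ⟨h4, hs, hb1, hbr⟩
    refine ⟨hs, (pvBoundA_left t n hn i h).mp hb1, ?_⟩
    exact (pvBoundA_right t n hn (i + 3)).mp (by rwa [show ((i + 3 : Nat) : Int) = (i : Int) + 3 from by omega])
  · rintro ⟨hs, hl, hr⟩
    have hlen : i + 3 ≤ n := by
      have := congrArg List.length hs
      simp [PySem.Chars.upper] at this
      omega
    refine ⟨hlen, hs, (pvBoundA_left t n hn i h).mpr hl, ?_⟩
    rw [show ((i : Int) + 3) = ((i + 3 : Nat) : Int) from by omega]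
    exact (pvBoundA_right t n hn (i + 3)).mpr hr

-- B makes no move at a position whose left neighbour is a word character
lemma pvLoopB_skip_word (t : List Char) (mask : List Bool) (n : Nat) (depth : Int) (i : Nat)
    (h : i < n) (hm : mask.getD i false = false) (h0 : i ≠ 0)
    (hw : pvWordB (t.getD (i - 1) ' ') = true) :
    pvLoopB t mask n depth i = pvLoopB t mask n depth (i + 1) := by
  rw [pvLoopB, if_pos h, if_neg (by simpa [List.getD] using hm)]
  rw [if_neg (by rintro ⟨-, (h' | h'), -⟩ <;> simp_all),
      if_neg (by rintro ⟨-, (h' | h'), -⟩ <;> simp_all)]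

lemma pvLoopB_skip_mask (t : List Char) (mask : List Bool) (n : Nat) (depth : Int) (i : Nat)
    (h : i < n) (hm : mask.getD i false = true) :
    pvLoopB t mask n depth i = pvLoopB t mask n depth (i + 1) := by
  rw [pvLoopB, if_pos h, if_pos (by simpa [List.getD] using hm)]

lemma pvWord_of_alpha {c : Char} (h : PySem.Chars.isalpha c = true) : pvWordB c = true := by
  simp [pvWordB, PySem.Chars.isalnum, h]

lemma pvStep_none (e : Bool) (c : Char) (h1 : c ≠ '\'') (h2 : c ≠ '"') :
    pvStepQ (none, e) c = (none, e) := by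
  simp [pvStepQ, h1, h2]

lemma pvStep_none_alpha (e : Bool) {c : Char} (hc : PySem.Chars.isalpha c = true) :
    pvStepQ (none, e) c = (none, e) :=
  pvStep_none e c (fun h => absurd (h ▸ hc) (by decide)) (fun h => absurd (h ▸ hc) (by decide))

lemma pvMask_get0 (t : List Char) (i : Nat) (h : i < t.length) :
    (pvMask t none false).getD i false = (pvStQ t i).1.isSome :=
  pvMask_get t i none false h

-- main loop equivalence
lemma pvLoop_eq (t : List Char) (n : Nat) (hn : n = t.length) :
    ∀ (k i : Nat) (inS inD esc : Bool) (depth : Int), n - i ≤ k →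
      pvRel inS inD esc (pvStQ t i) →
      pvLoopA t n inS inD esc depth i = pvLoopB t (pvMask t none false) n depth i := by
  intro k
  induction k with
  | zero =>
    intro i inS inD esc depth hk _
    have h : ¬ i < n := by omega
    rw [pvLoopA, pvLoopB, dif_neg h, if_neg h]
  | succ k ih =>
    intro i inS inD esc depth hk hrel
    by_cases hin : i < n
    swap
    · rw [pvLoopA, pvLoopB, dif_neg hin, if_neg hin]
    have hit : i < t.length := hn ▸ hin
    have hmask := pvMask_get0 t i hit
    have hstep := pvStQ_succ t i hit
    rcases hpair : pvStQ t i with ⟨q, e⟩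
    rw [hpair] at hrel hmask hstep
    obtain ⟨he, h1⟩ := hrel
    dsimp only at he hmask hstep
    subst he
    rcases h1 with ⟨hq, hS, hD⟩ | ⟨hq, hS, hD⟩ | ⟨hq, hS, hD⟩ <;> dsimp only at hq <;> subst hq <;> subst hS <;> subst hD
    -- ======== q = none : not inside a string literal ========
    · rw [pvLoopA, dif_pos hin, if_neg (show ¬((false || false) = true) by simp)]
      rw [pvLoopB, if_pos hin,
        if_neg (show ¬((pvMask t none false).getD i false = true) by rw [hmask]; simp)]
      have hd0 := pvDrop_cons t i hit
      by_cases hq1 : t.getD i ' ' = '\''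
      · -- opening single quote: A enters string; B's token tests fail on the quote head
        rw [if_pos hq1]
        have hnotC : ¬(PySem.Chars.upper ((t.drop i).take 4) = ['C', 'A', 'S', 'E'] ∧
            (i = 0 ∨ pvWordB (t.getD (i - 1) ' ') = false) ∧
            (i + 4 ≥ n ∨ pvWordB (t.getD (i + 4) ' ') = false)) := by
          rintro ⟨hs, -, -⟩; rw [hd0, hq1] at hs
          simp only [List.take_succ_cons, PySem.Chars.upper, List.map_cons, List.cons.injEq] at hs
          exact absurd hs.1 (by decide)
        have hnotE : ¬(PySem.Chars.upper ((t.drop i).take 3) = ['E', 'N', 'D'] ∧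
            (i = 0 ∨ pvWordB (t.getD (i - 1) ' ') = false) ∧
            (i + 3 ≥ n ∨ pvWordB (t.getD (i + 3) ' ') = false)) := by
          rintro ⟨hs, -, -⟩; rw [hd0, hq1] at hs
          simp only [List.take_succ_cons, PySem.Chars.upper, List.map_cons, List.cons.injEq] at hs
          exact absurd hs.1 (by decide)
        rw [if_neg hnotC, if_neg hnotE]
        refine ih (i + 1) true false e depth (by omega) ?_
        rw [hstep]; simp only [pvStepQ]
        rw [if_pos (Or.inl hq1)]
        simp [pvRel]
        simpa [List.getD] using hq1
      rw [if_neg hq1]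
      by_cases hq2 : t.getD i ' ' = '"'
      · rw [if_pos hq2]
        have hnotC : ¬(PySem.Chars.upper ((t.drop i).take 4) = ['C', 'A', 'S', 'E'] ∧
            (i = 0 ∨ pvWordB (t.getD (i - 1) ' ') = false) ∧
            (i + 4 ≥ n ∨ pvWordB (t.getD (i + 4) ' ') = false)) := by
          rintro ⟨hs, -, -⟩; rw [hd0, hq2] at hs
          simp only [List.take_succ_cons, PySem.Chars.upper, List.map_cons, List.cons.injEq] at hs
          exact absurd hs.1 (by decide)
        have hnotE : ¬(PySem.Chars.upper ((t.drop i).take 3) = ['E', 'N', 'D'] ∧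
            (i = 0 ∨ pvWordB (t.getD (i - 1) ' ') = false) ∧
            (i + 3 ≥ n ∨ pvWordB (t.getD (i + 3) ' ') = false)) := by
          rintro ⟨hs, -, -⟩; rw [hd0, hq2] at hs
          simp only [List.take_succ_cons, PySem.Chars.upper, List.map_cons, List.cons.injEq] at hs
          exact absurd hs.1 (by decide)
        rw [if_neg hnotC, if_neg hnotE]
        refine ih (i + 1) false true e depth (by omega) ?_
        rw [hstep]; simp only [pvStepQ]
        rw [if_pos (Or.inr hq2)]
        simp [pvRel]
        simpa [List.getD] using hq2
      rw [if_neg hq2]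
      have hstep' : pvStQ t (i + 1) = (none, e) := by rw [hstep, pvStep_none e _ hq1 hq2]
      by_cases hcA : i + 4 ≤ n ∧ PySem.Chars.upper ((t.drop i).take 4) = ['C', 'A', 'S', 'E'] ∧
          pvBoundA t n ((i : Int) - 1) = true ∧ pvBoundA t n ((i : Int) + 4) = true
      · -- CASE matched: A jumps to i+4; B steps through the letters, none of which can match
        rw [if_pos hcA, if_pos ((pvCondCase_iff t n hn i hin).mp hcA)]
        obtain ⟨h4, hs, -, -⟩ := id hcA
        have hd1 := pvDrop_cons t (i + 1) (by omega)
        have hd2 := pvDrop_cons t (i + 2) (by omega)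
        have hd3 := pvDrop_cons t (i + 3) (by omega)
        rw [hd0, hd1, hd2, hd3] at hs
        simp only [List.take_succ_cons, List.take_zero, PySem.Chars.upper, List.map_cons,
          List.map_nil, List.cons.injEq, and_true] at hs
        obtain ⟨hu0, hu1, hu2, hu3⟩ := hs
        have ha0 : PySem.Chars.isalpha (t.getD i ' ') = true := pvAlpha_of_upperChar (by decide) hu0
        have ha1 : PySem.Chars.isalpha (t.getD (i + 1) ' ') = true := pvAlpha_of_upperChar (by decide) hu1
        have ha2 : PySem.Chars.isalpha (t.getD (i + 2) ' ') = true := pvAlpha_of_upperChar (by decide) hu2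
        have hs1 : pvStQ t (i + 1) = (none, e) := by rw [hstep, pvStep_none_alpha e ha0]
        have hs2 : pvStQ t (i + 2) = (none, e) := by
          rw [pvStQ_succ t (i + 1) (by omega), hs1, pvStep_none_alpha e ha1]
        have hs3 : pvStQ t (i + 3) = (none, e) := by
          rw [pvStQ_succ t (i + 2) (by omega), hs2, pvStep_none_alpha e ha2]
        have hs4 : pvStQ t (i + 4) = (none, e) := by
          rw [pvStQ_succ t (i + 3) (by omega), hs3,
            pvStep_none_alpha e (pvAlpha_of_upperChar (by decide) hu3)]
        rw [pvLoopB_skip_word t _ n _ (i + 1) (by omega)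
              (by rw [pvMask_get0 t (i + 1) (by omega), hs1]; rfl) (by omega)
              (by simpa using pvWord_of_alpha ha0),
            pvLoopB_skip_word t _ n _ (i + 2) (by omega)
              (by rw [pvMask_get0 t (i + 2) (by omega), hs2]; rfl) (by omega)
              (by simpa using pvWord_of_alpha ha1),
            pvLoopB_skip_word t _ n _ (i + 3) (by omega)
              (by rw [pvMask_get0 t (i + 3) (by omega), hs3]; rfl) (by omega)
              (by simpa using pvWord_of_alpha ha2)]
        refine ih (i + 4) false false e (depth + 1) (by omega) ?_
        rw [hs4]; simp [pvRel]
      rw [if_neg hcA, if_neg (fun hc => hcA ((pvCondCase_iff t n hn i hin).mpr hc))]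
      by_cases hcE : i + 3 ≤ n ∧ PySem.Chars.upper ((t.drop i).take 3) = ['E', 'N', 'D'] ∧
          pvBoundA t n ((i : Int) - 1) = true ∧ pvBoundA t n ((i : Int) + 3) = true
      · -- END matched
        rw [if_pos hcE, if_pos ((pvCondEnd_iff t n hn i hin).mp hcE)]
        obtain ⟨h3, hs, -, -⟩ := id hcE
        by_cases hdep : depth ≤ 0
        · rw [if_pos hdep, if_pos hdep]
        rw [if_neg hdep, if_neg hdep]
        by_cases hdep1 : depth - 1 = 0
        · rw [if_pos hdep1, if_pos hdep1]
        rw [if_neg hdep1, if_neg hdep1]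
        have hd1 := pvDrop_cons t (i + 1) (by omega)
        have hd2 := pvDrop_cons t (i + 2) (by omega)
        rw [hd0, hd1, hd2] at hs
        simp only [List.take_succ_cons, List.take_zero, PySem.Chars.upper, List.map_cons,
          List.map_nil, List.cons.injEq, and_true] at hs
        obtain ⟨hu0, hu1, hu2⟩ := hs
        have ha0 : PySem.Chars.isalpha (t.getD i ' ') = true := pvAlpha_of_upperChar (by decide) hu0
        have ha1 : PySem.Chars.isalpha (t.getD (i + 1) ' ') = true := pvAlpha_of_upperChar (by decide) hu1
        have hs1 : pvStQ t (i + 1) = (none, e) := by rw [hstep, pvStep_none_alpha e ha0]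
        have hs2 : pvStQ t (i + 2) = (none, e) := by
          rw [pvStQ_succ t (i + 1) (by omega), hs1, pvStep_none_alpha e ha1]
        have hs3 : pvStQ t (i + 3) = (none, e) := by
          rw [pvStQ_succ t (i + 2) (by omega), hs2,
            pvStep_none_alpha e (pvAlpha_of_upperChar (by decide) hu2)]
        rw [pvLoopB_skip_word t _ n _ (i + 1) (by omega)
              (by rw [pvMask_get0 t (i + 1) (by omega), hs1]; rfl) (by omega)
              (by simpa using pvWord_of_alpha ha0),
            pvLoopB_skip_word t _ n _ (i + 2) (by omega)
              (by rw [pvMask_get0 t (i + 2) (by omega), hs2]; rfl) (by omega)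
              (by simpa using pvWord_of_alpha ha1)]
        refine ih (i + 3) false false e (depth - 1) (by omega) ?_
        rw [hs3]; simp [pvRel]
      rw [if_neg hcE, if_neg (fun hc => hcE ((pvCondEnd_iff t n hn i hin).mpr hc))]
      refine ih (i + 1) false false e depth (by omega) ?_
      rw [hstep']; simp [pvRel]
    -- ======== q = some '\'' : inside a single-quoted string ========
    · rw [pvLoopB_skip_mask t _ n depth i hin (by rw [hmask]; rfl)]
      rw [pvLoopA, dif_pos hin, if_pos (show (true || false) = true from rfl)]
      by_cases h2 : e = true
      · rw [if_pos h2]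
        refine ih (i + 1) true false false depth (by omega) ?_
        rw [hstep]; simp only [pvStepQ]
        rw [if_pos h2]; simp [pvRel]
      rw [if_neg h2]
      by_cases h3 : t.getD i ' ' = '\\'
      · rw [if_pos h3]
        refine ih (i + 1) true false true depth (by omega) ?_
        rw [hstep]; simp only [pvStepQ]
        rw [if_neg h2, if_pos h3]; simp [pvRel]
      rw [if_neg h3]
      by_cases h4 : t.getD i ' ' = '\''
      · rw [if_pos ⟨rfl, h4⟩]
        refine ih (i + 1) false false e depth (by omega) ?_
        rw [hstep]; simp only [pvStepQ]
        rw [if_neg h2, if_neg h3, if_pos h4]; simp [pvRel]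
      rw [if_neg (show ¬((true : Bool) = true ∧ t.getD i ' ' = '\'') from fun hc => h4 hc.2),
          if_neg (show ¬((false : Bool) = true ∧ t.getD i ' ' = '"') from fun hc => by simp at hc)]
      refine ih (i + 1) true false e depth (by omega) ?_
      rw [hstep]; simp only [pvStepQ]
      rw [if_neg h2, if_neg h3, if_neg h4]; simp [pvRel]
    -- ======== q = some '"' : inside a double-quoted string ========
    · rw [pvLoopB_skip_mask t _ n depth i hin (by rw [hmask]; rfl)]
      rw [pvLoopA, dif_pos hin, if_pos (show (false || true) = true from rfl)]
      by_cases h2 : e = true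
      · rw [if_pos h2]
        refine ih (i + 1) false true false depth (by omega) ?_
        rw [hstep]; simp only [pvStepQ]
        rw [if_pos h2]; simp [pvRel]
      rw [if_neg h2]
      by_cases h3 : t.getD i ' ' = '\\'
      · rw [if_pos h3]
        refine ih (i + 1) false true true depth (by omega) ?_
        rw [hstep]; simp only [pvStepQ]
        rw [if_neg h2, if_pos h3]; simp [pvRel]
      rw [if_neg h3]
      rw [if_neg (show ¬((false : Bool) = true ∧ t.getD i ' ' = '\'') from fun hc => by simp at hc)]
      by_cases h4 : t.getD i ' ' = '"'
      · rw [if_pos ⟨rfl, h4⟩]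
        refine ih (i + 1) false false e depth (by omega) ?_
        rw [hstep]; simp only [pvStepQ]
        rw [if_neg h2, if_neg h3, if_pos h4]; simp [pvRel]
      rw [if_neg (show ¬((true : Bool) = true ∧ t.getD i ' ' = '"') from fun hc => h4 hc.2)]
      refine ih (i + 1) false true e depth (by omega) ?_
      rw [hstep]; simp only [pvStepQ]
      rw [if_neg h2, if_neg h3, if_neg h4]; simp [pvRel]

theorem pv_main (expr : String) :
    gfql_find_matching_case_end expr = gfql_find_matching_case_end_alt expr := by
  unfold gfql_find_matching_case_end gfql_find_matching_case_end_alt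
  by_cases h : (PySem.Str.strip expr).toList.length < 8
  · rw [if_pos h, if_pos h]
  · rw [if_neg h, if_neg h]
    exact pvLoop_eq _ _ rfl _ 0 false false false 0 (le_refl _) (by simp [pvRel, pvStQ])

-- ===== VERDICT (by name: the statement is the Claim_ definition above) =====
theorem gfql_find_matching_case_end_spec : Claim_equal_gfql_find_matching_case_end :=
  fun expr _ => pv_main expr
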